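-- pv_equiv track=rewrite | github.com/codewithwu/demo | research_topic_agent/credibility/conflict_detector.py | get_conflict_severity
-- ===== SOURCE A (Python) =====
-- def get_conflict_severity(conflicts: list[str]) -> str:
--     """评估冲突严重程度"""
--     if not conflicts:
--         return "low"
--
--     has_high = any("[HIGH]" in c or "[CRITICAL]" in c for c in conflicts)
--     has_medium = any("[MEDIUM]" in c for c in conflicts)
--
--     if has_high:
--         return "high"
--     elif has_medium:
--         return "medium"
--     else:
--         return "low"
-- ===== SOURCE B (Python) =====
-- _TIERS = ("low", "medium", "high")
--
--
-- def _rank(c: str) -> int: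
--     """Numeric severity of one conflict string."""
--     if "[HIGH]" in c or "[CRITICAL]" in c:
--         return 2
--     if "[MEDIUM]" in c:
--         return 1
--     return 0
--
--
-- def get_conflict_severity(conflicts: list[str]) -> str:
--     """Map each conflict to a numeric rank, take the maximum, index a tier table."""
--     return _TIERS[max(map(_rank, conflicts), default=0)]
-- ===== Notes on version B (the rewrite author's own statement) =====
-- stated objective: alternative
-- what changed: Instead of boolean any() scans and an if/elif cascade, B maps every conflict to a numeric rank (0/1/2), reduces with max, and indexes a fixed tier table to produce the label.
import Mathlib
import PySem

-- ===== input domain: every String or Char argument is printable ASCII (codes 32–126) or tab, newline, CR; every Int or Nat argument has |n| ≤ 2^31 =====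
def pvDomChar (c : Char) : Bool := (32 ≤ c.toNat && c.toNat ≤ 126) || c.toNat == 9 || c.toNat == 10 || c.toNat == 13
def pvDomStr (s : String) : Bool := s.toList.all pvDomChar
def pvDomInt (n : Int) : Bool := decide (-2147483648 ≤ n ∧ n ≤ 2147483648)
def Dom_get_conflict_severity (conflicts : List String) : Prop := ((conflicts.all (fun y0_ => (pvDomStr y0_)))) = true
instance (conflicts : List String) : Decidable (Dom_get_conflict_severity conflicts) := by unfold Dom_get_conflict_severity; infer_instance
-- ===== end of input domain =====

-- ===== PORT A =====
-- A: empty guard, then two any() scans over all conflicts, then an if/elif cascade.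
def get_conflict_severity (conflicts : List String) : String :=
  if conflicts = [] then "low"
  else
    let has_high := conflicts.any (fun c => PySem.Str.isIn "[HIGH]" c || PySem.Str.isIn "[CRITICAL]" c)
    let has_medium := conflicts.any (fun c => PySem.Str.isIn "[MEDIUM]" c)
    if has_high then "high" else if has_medium then "medium" else "low"

-- ===== PORT B =====
-- B: rank every conflict numerically (0/1/2), reduce with max, index a tier table.
def pvTiers : List String := ["low", "medium", "high"]

def pvRank (c : String) : Nat :=
  if PySem.Str.isIn "[HIGH]" c || PySem.Str.isIn "[CRITICAL]" c then 2
  else if PySem.Str.isIn "[MEDIUM]" c then 1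
  else 0

def get_conflict_severity_alt (conflicts : List String) : String :=
  pvTiers.getD ((conflicts.map pvRank).foldl Nat.max 0) "low"

-- ===== PRECONDITION & SPEC =====
def Spec_get_conflict_severity (conflicts : List String) (out : String) : Prop := out = get_conflict_severity_alt conflicts
instance (conflicts : List String) (out : String) : Decidable (Spec_get_conflict_severity conflicts out) := by unfold Spec_get_conflict_severity; infer_instance

-- ===== CLAIM =====
def Claim_equal_get_conflict_severity : Prop := ∀ (conflicts : List String), Dom_get_conflict_severity conflicts → Spec_get_conflict_severity conflicts (get_conflict_severity conflicts)

-- ===== LEMMAS AND PROOFS =====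
lemma pvFold_max (l : List String) (a : Nat) :
    (l.map pvRank).foldl Nat.max a =
      Nat.max a (if l.any (fun c => PySem.Str.isIn "[HIGH]" c || PySem.Str.isIn "[CRITICAL]" c) then 2
        else if l.any (fun c => PySem.Str.isIn "[MEDIUM]" c) then 1 else 0) := by
  induction l generalizing a with
  | nil => simp
  | cons c rest ih =>
    simp only [List.map_cons, List.foldl_cons, List.any_cons, ih, pvRank]
    rcases Bool.eq_false_or_eq_true (PySem.Str.isIn "[HIGH]" c || PySem.Str.isIn "[CRITICAL]" c) with h1 | h1 <;>
      rcases Bool.eq_false_or_eq_true (PySem.Str.isIn "[MEDIUM]" c) with h2 | h2 <;>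
      rcases Bool.eq_false_or_eq_true (rest.any fun c => PySem.Str.isIn "[HIGH]" c || PySem.Str.isIn "[CRITICAL]" c) with h3 | h3 <;>
      rcases Bool.eq_false_or_eq_true (rest.any fun c => PySem.Str.isIn "[MEDIUM]" c) with h4 | h4 <;>
      simp only [h1, h2, h3, h4] <;> norm_num

-- ===== VERDICT =====
theorem get_conflict_severity_spec : Claim_equal_get_conflict_severity := by
  intro conflicts _
  unfold Spec_get_conflict_severity get_conflict_severity get_conflict_severity_alt
  rw [pvFold_max]
  rcases conflicts with _ | ⟨c, rest⟩
  · simp [pvTiers]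
  · simp only [List.any_cons]
    split_ifs with h1 h2 <;> simp_all [pvTiers]
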